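-- pv_equiv track=rewrite | github.com/Ashu-1505/PSG-Hackathon | app.py | overview
-- ===== SOURCE A (Python) =====
-- def overview(a,b):
--     on=[0,0,0,0]
--     un=[0,0,0,0]
--     for i in range(0,len(a)):
--         if i%2==0:
--             on[0]+=a[i][3]+b[i][3]
--             on[1]+=a[i][0]+b[i][0]
--             on[2]+=a[i][1]+b[i][1]
--             on[3]+=a[i][2]+b[i][2]
--         else:
--             un[0]+=a[i][3]+b[i][3]
--             un[1]+=a[i][0]+b[i][0]
--             un[2]+=a[i][1]+b[i][1]
--             un[3]+=a[i][2]+b[i][2]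
--     return on,un
-- ===== SOURCE B (Python) =====
-- def overview(a, b):
--     # column-major: each of the 8 totals is its own per-column sum
--     n = len(a)
--     on = [sum(a[i][j] + b[i][j] for i in range(0, n, 2)) for j in (3, 0, 1, 2)]
--     un = [sum(a[i][j] + b[i][j] for i in range(1, n, 2)) for j in (3, 0, 1, 2)]
--     return on, un
-- ===== Notes on version B (the rewrite author's own statement) =====
-- stated objective: alternative
-- what changed: Traversal flipped from A's single row-major pass mutating two 4-list accumulators to a column-major computation: each of the eight outputs is an independent sum over one column restricted to the even or odd strided row range (correct because addition is commutative/associative).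
import Mathlib
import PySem

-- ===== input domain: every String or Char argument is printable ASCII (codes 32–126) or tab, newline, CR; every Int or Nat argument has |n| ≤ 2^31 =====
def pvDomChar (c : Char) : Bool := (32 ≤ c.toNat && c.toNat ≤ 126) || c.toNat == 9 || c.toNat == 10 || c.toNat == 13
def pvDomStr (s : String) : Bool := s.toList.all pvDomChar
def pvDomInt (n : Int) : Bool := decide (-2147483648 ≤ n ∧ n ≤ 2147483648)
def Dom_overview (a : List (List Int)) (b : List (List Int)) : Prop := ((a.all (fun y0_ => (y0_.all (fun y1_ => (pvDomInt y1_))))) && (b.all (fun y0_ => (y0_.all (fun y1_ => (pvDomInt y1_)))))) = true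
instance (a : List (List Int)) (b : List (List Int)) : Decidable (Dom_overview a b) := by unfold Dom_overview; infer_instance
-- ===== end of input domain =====

-- B flips the traversal: instead of A's single row-major pass mutating two 4-list
-- accumulators, each of the eight outputs is an independent column-major sum over the
-- even or odd strided row range; same O(n) cost, different traversal order.

-- ===== PORT A =====
-- a[i][j] + b[i][j]; shared abbreviation for the repeated access in both ports
def cell (a : List (List Int)) (b : List (List Int)) (j : Int) (i : Int) : Int :=
  PySem.List.pyGetD (PySem.List.pyGetD a i []) j 0 + PySem.List.pyGetD (PySem.List.pyGetD b i []) j 0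

-- the body of A's loop: on[k] += …  /  un[k] += …  (sequential in-place updates via pySetD)
def astep (a : List (List Int)) (b : List (List Int)) (st : List Int × List Int) (i : Int) : List Int × List Int :=
  let on := st.1
  let un := st.2
  if PySem.Int.mod i 2 == 0 then
    let on := PySem.List.pySetD on 0 (PySem.List.pyGetD on 0 0 + cell a b 3 i)
    let on := PySem.List.pySetD on 1 (PySem.List.pyGetD on 1 0 + cell a b 0 i)
    let on := PySem.List.pySetD on 2 (PySem.List.pyGetD on 2 0 + cell a b 1 i)
    let on := PySem.List.pySetD on 3 (PySem.List.pyGetD on 3 0 + cell a b 2 i)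
    (on, un)
  else
    let un := PySem.List.pySetD un 0 (PySem.List.pyGetD un 0 0 + cell a b 3 i)
    let un := PySem.List.pySetD un 1 (PySem.List.pyGetD un 1 0 + cell a b 0 i)
    let un := PySem.List.pySetD un 2 (PySem.List.pyGetD un 2 0 + cell a b 1 i)
    let un := PySem.List.pySetD un 3 (PySem.List.pyGetD un 3 0 + cell a b 2 i)
    (on, un)

def overview (a : List (List Int)) (b : List (List Int)) : List Int × List Int :=
  (PySem.List.pyRange 0 (a.length : Int) 1).foldl (astep a b) ([0, 0, 0, 0], [0, 0, 0, 0])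

-- ===== PORT B =====
-- sum(a[i][j] + b[i][j] for i in idxs): Python's sum folds left with +, starting at 0
def colsum (a : List (List Int)) (b : List (List Int)) (idxs : List Int) (j : Int) : Int :=
  idxs.foldl (fun s i => s + cell a b j i) 0

def overview_alt (a : List (List Int)) (b : List (List Int)) : List Int × List Int :=
  (([3, 0, 1, 2] : List Int).map (colsum a b (PySem.List.pyRange 0 (a.length : Int) 2)),
   ([3, 0, 1, 2] : List Int).map (colsum a b (PySem.List.pyRange 1 (a.length : Int) 2)))

-- ===== PRECONDITION & SPEC =====
-- Exactly the inputs on which Python A returns: b is at least as long as a (else b[i] raises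
-- IndexError) and every row touched (all of a, the first len(a) rows of b) has ≥ 4 entries.
def Pre_overview (a : List (List Int)) (b : List (List Int)) : Prop :=
  a.length ≤ b.length ∧ (∀ r ∈ a, 4 ≤ r.length) ∧ (∀ r ∈ b.take a.length, 4 ≤ r.length)

instance (a : List (List Int)) (b : List (List Int)) : Decidable (Pre_overview a b) := by
  unfold Pre_overview; infer_instance

def pvWitness_overview : List (List Int) × List (List Int) := ([[1, 2, 3, 4]], [[5, 6, 7, 8]])

def Spec_overview (a : List (List Int)) (b : List (List Int)) (out : List Int × List Int) : Prop := out = overview_alt a b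
instance (a : List (List Int)) (b : List (List Int)) (out : List Int × List Int) : Decidable (Spec_overview a b out) := by unfold Spec_overview; infer_instance

-- ===== CLAIM (what is proved, stated in full; the proofs are below) =====
def Claim_equal_overview : Prop := ∀ (a : List (List Int)) (b : List (List Int)), Dom_overview a b → Pre_overview a b → Spec_overview a b (overview a b)

-- ===== LEMMAS AND PROOFS =====

-- column sum of cell over an index list, in map/sum form (proof-side normal form)
def csum (a : List (List Int)) (b : List (List Int)) (j : Int) (l : List Int) : Int :=
  (l.map (cell a b j)).sum

lemma colsum_eq_csum (a b : List (List Int)) (l : List Int) (j : Int) :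
    colsum a b l j = csum a b j l := by
  unfold colsum csum
  suffices h : ∀ (c : Int), l.foldl (fun s i => s + cell a b j i) c = c + (l.map (cell a b j)).sum by
    simpa using h 0
  induction l with
  | nil => intro c; simp
  | cons i t ih =>
      intro c
      simp only [List.foldl_cons, List.map_cons, List.sum_cons, ih]
      ring

-- intermediate B-shape used only in the proof: a fold building a fresh 4-list
def bstep (a : List (List Int)) (b : List (List Int)) (t : List Int) (i : Int) : List Int :=
  [PySem.List.pyGetD t 0 0 + cell a b 3 i,
   PySem.List.pyGetD t 1 0 + cell a b 0 i,
   PySem.List.pyGetD t 2 0 + cell a b 1 i,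
   PySem.List.pyGetD t 3 0 + cell a b 2 i]

lemma bstep_eval (a b : List (List Int)) (w x y z i : Int) :
    bstep a b [w, x, y, z] i =
      [w + cell a b 3 i, x + cell a b 0 i, y + cell a b 1 i, z + cell a b 2 i] := rfl

lemma astep_even (a b : List (List Int)) (w x y z u1 u2 u3 u4 i : Int)
    (h : PySem.Int.mod i 2 = 0) :
    astep a b ([w, x, y, z], [u1, u2, u3, u4]) i =
      ([w + cell a b 3 i, x + cell a b 0 i, y + cell a b 1 i, z + cell a b 2 i],
       [u1, u2, u3, u4]) := by
  unfold astep
  rw [h]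
  rfl

lemma astep_odd (a b : List (List Int)) (w x y z u1 u2 u3 u4 i : Int)
    (h : PySem.Int.mod i 2 ≠ 0) :
    astep a b ([w, x, y, z], [u1, u2, u3, u4]) i =
      ([w, x, y, z],
       [u1 + cell a b 3 i, u2 + cell a b 0 i, u3 + cell a b 1 i, u4 + cell a b 2 i]) := by
  have hb : (PySem.Int.mod i 2 == 0) = false := by
    simpa using h
  unfold astep
  rw [hb]
  rfl

lemma bstep_fold (a b : List (List Int)) :
    ∀ (l : List Int) (w x y z : Int),
      l.foldl (bstep a b) [w, x, y, z] =
        [w + csum a b 3 l, x + csum a b 0 l, y + csum a b 1 l, z + csum a b 2 l] := by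
  intro l
  induction l with
  | nil => intro w x y z; simp [csum]
  | cons i t ih =>
      intro w x y z
      simp only [List.foldl_cons, bstep_eval, ih, csum, List.map_cons, List.sum_cons]
      ring_nf

lemma pyRange_two_succ_hit (x y : Int) (h1 : x ≤ y) (h2 : (2 : Int) ∣ y - x) :
    PySem.List.pyRange x (y + 1) 2 = PySem.List.pyRange x y 2 ++ [y] := by
  obtain ⟨t, ht⟩ := h2
  have hx : x < y + 1 := by omega
  rw [PySem.List.pyRange_of_pos x (y + 1) (by norm_num),
      PySem.List.pyRange_of_pos x y (by norm_num)]
  have hold : (if x < y then ((y - x + 2 - 1) / 2).toNat else 0) = t.toNat := by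
    split <;> omega
  have hnew : ((y + 1 - x + 2 - 1) / 2).toNat = t.toNat + 1 := by omega
  rw [if_pos hx, hold, hnew, List.range_succ, List.map_append]
  simp only [List.map_cons, List.map_nil]
  congr 2
  omega

lemma pyRange_two_succ_miss (x y : Int) (h : y < x ∨ ¬ (2 : Int) ∣ y - x) :
    PySem.List.pyRange x (y + 1) 2 = PySem.List.pyRange x y 2 := by
  rw [PySem.List.pyRange_of_pos x (y + 1) (by norm_num),
      PySem.List.pyRange_of_pos x y (by norm_num)]
  have hc : (if x < y + 1 then ((y + 1 - x + 2 - 1) / 2).toNat else 0)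
      = (if x < y then ((y - x + 2 - 1) / 2).toNat else 0) := by
    rcases h with h | h
    · split <;> split <;> omega
    · split <;> split <;> omega
  rw [hc]

lemma astep_fold (a b : List (List Int)) :
    ∀ (n : Nat) (w x y z u1 u2 u3 u4 : Int),
      (PySem.List.pyRange 0 (n : Int) 1).foldl (astep a b) ([w, x, y, z], [u1, u2, u3, u4]) =
        ((PySem.List.pyRange 0 (n : Int) 2).foldl (bstep a b) [w, x, y, z],
         (PySem.List.pyRange 1 (n : Int) 2).foldl (bstep a b) [u1, u2, u3, u4]) := by
  intro n
  induction n with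
  | zero =>
      intro w x y z u1 u2 u3 u4
      simp [PySem.List.pyRange_of_pos]
  | succ n ih =>
      intro w x y z u1 u2 u3 u4
      have hcast : ((n + 1 : Nat) : Int) = (n : Int) + 1 := by push_cast; ring
      rw [hcast, PySem.List.pyRange_one_succ_right (a := 0) (b := (n : Int)) (by omega),
          List.foldl_append, ih]
      have hmod : PySem.Int.mod (n : Int) 2 = ((n % 2 : Nat) : Int) := by
        exact_mod_cast PySem.Int.mod_natCast n 2
      rcases Nat.even_or_odd n with he | ho
      · have h2 : PySem.Int.mod (n : Int) 2 = 0 := by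
          rw [hmod]; obtain ⟨k, hk⟩ := he; omega
        rw [pyRange_two_succ_hit 0 (n : Int) (by omega) (by omega),
            pyRange_two_succ_miss 1 (n : Int) (by right; obtain ⟨k, hk⟩ := he; omega),
            List.foldl_append, bstep_fold, bstep_fold]
        simp only [List.foldl_cons, List.foldl_nil]
        rw [astep_even a b _ _ _ _ _ _ _ _ _ h2]
        simp only [bstep_eval]
      · have h2 : PySem.Int.mod (n : Int) 2 ≠ 0 := by
          rw [hmod]; obtain ⟨k, hk⟩ := ho; omega
        have h1n : (1 : Int) ≤ (n : Int) := by obtain ⟨k, hk⟩ := ho; omega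
        rw [pyRange_two_succ_miss 0 (n : Int) (by right; obtain ⟨k, hk⟩ := ho; omega),
            pyRange_two_succ_hit 1 (n : Int) h1n (by obtain ⟨k, hk⟩ := ho; omega),
            List.foldl_append, bstep_fold, bstep_fold]
        simp only [List.foldl_cons, List.foldl_nil]
        rw [astep_odd a b _ _ _ _ _ _ _ _ _ h2]
        simp only [bstep_eval]

-- ===== VERDICT (by name: the statement is the Claim_ definition above) =====
theorem overview_spec : Claim_equal_overview := by
  intro a b _ _
  unfold Spec_overview overview overview_alt
  rw [astep_fold, bstep_fold, bstep_fold]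
  simp [List.map_cons, colsum_eq_csum]
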